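-- pv_equiv track=rewrite | github.com/Xtraa777/ALGORITHM_CODE_KATA | 프로그래머스/0/181923. 수열과 구간 쿼리 2/수열과 구간 쿼리 2.py | solution
-- ===== SOURCE A (Python) =====
-- def solution(arr, queries):
--     answer = []
--
--     for s, e, k in queries:
--         tmp = []
--         for i in range(s, e+1):
--             if arr[i] > k:
--                 tmp.append(arr[i])
--         if not tmp:
--             answer.append(-1)
--         else:
--             answer.append(min(tmp))
--
--     return answer
-- ===== SOURCE B (Python) =====
-- def solution(arr, queries):
--     # Sort (index, value) pairs by value once; each query then takes the FIRST
--     # pair in ascending-value order whose value exceeds k and whose index lies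
--     # in [s, e] -- that value is exactly min{arr[i] : s <= i <= e, arr[i] > k}.
--     pairs = sorted(enumerate(arr), key=lambda p: p[1])
--     answer = []
--     for s, e, k in queries:
--         ans = -1
--         for i, v in pairs:
--             if v > k and s <= i and i <= e:
--                 ans = v
--                 break
--         answer.append(ans)
--     return answer
-- ===== Notes on version B (the rewrite author's own statement) =====
-- stated objective: alternative
-- what changed: B sorts the (index, value) pairs by value once up front and answers each query by taking the first pair in ascending-value order with value > k and index in [s, e] (breaking early), instead of A's per-query rescan of the subarray followed by min(); Pre_ restricts to the kata's natural domain (0 <= s and e < len(arr) for every non-empty range), outside which A raises IndexError or reads via Python's negative-index wraparound.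
-- outside the precondition, e.g. on solution([1, 5], [(-1, 0, 3)]): A returns [5], B returns [-1]
import Mathlib
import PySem

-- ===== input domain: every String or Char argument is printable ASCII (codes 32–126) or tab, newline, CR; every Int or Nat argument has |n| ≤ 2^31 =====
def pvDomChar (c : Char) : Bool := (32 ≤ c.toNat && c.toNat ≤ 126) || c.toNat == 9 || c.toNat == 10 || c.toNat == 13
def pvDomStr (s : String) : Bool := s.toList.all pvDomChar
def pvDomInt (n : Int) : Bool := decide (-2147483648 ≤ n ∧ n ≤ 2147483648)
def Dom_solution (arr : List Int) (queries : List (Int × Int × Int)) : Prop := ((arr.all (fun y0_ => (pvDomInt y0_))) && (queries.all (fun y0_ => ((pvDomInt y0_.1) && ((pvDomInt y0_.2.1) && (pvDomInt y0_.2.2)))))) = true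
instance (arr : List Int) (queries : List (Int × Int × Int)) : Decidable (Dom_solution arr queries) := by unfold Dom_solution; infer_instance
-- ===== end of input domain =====

-- B sorts the (index, value) pairs by value once and answers each query by the first
-- pair (early break) with value > k and index in [s, e]; alternative decomposition,
-- equivalence of the RETURN value is proved on the kata's natural domain (Pre_).

-- ===== PORT A =====
-- per-query body of A: tmp = [arr[i] for i in range(s, e+1) if arr[i] > k]; -1 if empty else min(tmp)
-- (arr[i] via pyGet?; the 'none' branch is unreachable inside Pre_solution, where Python would raise IndexError)
def aAns (arr : List Int) (q : Int × Int × Int) : Int :=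
  let tmp := (PySem.List.pyRange q.1 (q.2.1 + 1) 1).foldl
    (fun tmp i =>
      match PySem.List.pyGet? arr i with
      | some v => if v > q.2.2 then tmp ++ [v] else tmp
      | none => tmp) []
  if tmp = [] then -1
  else match PySem.List.min? tmp (fun x => x) with
       | some m => m
       | none => -1

def solution (arr : List Int) (queries : List (Int × Int × Int)) : List Int :=
  queries.foldl (fun answer q => answer ++ [aAns arr q]) []

-- ===== PORT B =====
-- inner loop of B: first pair (i, v) of the value-sorted list with v > k and s ≤ i ≤ e, else -1
def findAns (pairs : List (Int × Int)) (s e k : Int) : Int :=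
  match pairs with
  | [] => -1
  | (i, v) :: rest => if v > k ∧ s ≤ i ∧ i ≤ e then v else findAns rest s e k

def solution_alt (arr : List Int) (queries : List (Int × Int × Int)) : List Int :=
  let pairs := PySem.List.sorted (PySem.List.enumerate arr 0) (fun p => p.2)
  queries.foldl (fun answer q => answer ++ [findAns pairs q.1 q.2.1 q.2.2]) []

-- ===== PRECONDITION & SPEC =====
-- Pre_ restricts to the kata's natural domain: every non-empty query range (s ≤ e) has
-- 0 ≤ s and e < len(arr). Outside it A either raises IndexError or silently reads through
-- Python's negative-index wraparound, an artefact of A's indexing.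
def Pre_solution (arr : List Int) (queries : List (Int × Int × Int)) : Prop :=
  ∀ q ∈ queries, q.1 ≤ q.2.1 → 0 ≤ q.1 ∧ q.2.1 < (arr.length : Int)
instance (arr : List Int) (queries : List (Int × Int × Int)) : Decidable (Pre_solution arr queries) := by unfold Pre_solution; infer_instance

def pvWitness_solution : List Int × (List (Int × Int × Int)) := ([3, 1, 4, 1, 5], [(0, 2, 2), (1, 4, 0), (3, 1, 7)])

def Spec_solution (arr : List Int) (queries : List (Int × Int × Int)) (out : List Int) : Prop := out = solution_alt arr queries
instance (arr : List Int) (queries : List (Int × Int × Int)) (out : List Int) : Decidable (Spec_solution arr queries out) := by unfold Spec_solution; infer_instance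

-- ===== CLAIM (what is proved, stated in full; the proofs are below) =====
def Claim_equal_solution : Prop := ∀ (arr : List Int) (queries : List (Int × Int × Int)), Dom_solution arr queries → Pre_solution arr queries → Spec_solution arr queries (solution arr queries)

-- ===== LEMMAS AND PROOFS =====

def pvPred (s e k : Int) (p : Int × Int) : Prop := p.2 > k ∧ s ≤ p.1 ∧ p.1 ≤ e

lemma findAns_of_none (pairs : List (Int × Int)) (s e k : Int)
    (h : ∀ p ∈ pairs, ¬ pvPred s e k p) : findAns pairs s e k = -1 := by
  induction pairs with
  | nil => rfl
  | cons hd tl ih =>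
    obtain ⟨i, v⟩ := hd
    have hhd := h (i, v) (List.mem_cons_self)
    simp only [pvPred] at hhd
    simp only [findAns]
    rw [if_neg hhd]
    exact ih (fun p hp => h p (List.mem_cons_of_mem _ hp))

lemma findAns_spec (pairs : List (Int × Int)) (s e k : Int)
    (hsort : pairs.Pairwise (fun a b => a.2 ≤ b.2))
    (p0 : Int × Int) (hp0 : p0 ∈ pairs) (hpred : pvPred s e k p0) :
    (∃ p ∈ pairs, pvPred s e k p ∧ findAns pairs s e k = p.2) ∧
      ∀ q ∈ pairs, pvPred s e k q → findAns pairs s e k ≤ q.2 := by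
  induction pairs with
  | nil => cases hp0
  | cons hd tl ih =>
    obtain ⟨i, v⟩ := hd
    by_cases hh : pvPred s e k (i, v)
    · have hh' : v > k ∧ s ≤ i ∧ i ≤ e := hh
      have hfa : findAns ((i, v) :: tl) s e k = v := by
        simp only [findAns]; rw [if_pos hh']
      refine ⟨⟨(i, v), List.mem_cons_self, hh, hfa⟩, ?_⟩
      intro q hq hqpred
      rw [hfa]
      rcases List.mem_cons.mp hq with h1 | h2
      · rw [h1]
      · exact List.pairwise_cons.mp hsort |>.1 q h2
    · have hh' : ¬ (v > k ∧ s ≤ i ∧ i ≤ e) := hh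
      have hfa : findAns ((i, v) :: tl) s e k = findAns tl s e k := by
        simp only [findAns]; rw [if_neg hh']
      have hp0' : p0 ∈ tl := by
        rcases List.mem_cons.mp hp0 with h1 | h2
        · exact absurd (h1 ▸ hpred) hh
        · exact h2
      have := ih (List.pairwise_cons.mp hsort).2 hp0'
      refine ⟨?_, ?_⟩
      · obtain ⟨p, hp, hpp, hpv⟩ := this.1
        exact ⟨p, List.mem_cons_of_mem _ hp, hpp, hfa ▸ hpv⟩
      · intro q hq hqpred
        rw [hfa]
        rcases List.mem_cons.mp hq with h1 | h2
        · exact absurd (h1 ▸ hqpred) hh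
        · exact this.2 q h2 hqpred

lemma mem_enumerate_iff (arr : List Int) (st i v : Int) :
    (i, v) ∈ PySem.List.enumerate arr st ↔
      ∃ n : Nat, n < arr.length ∧ i = st + n ∧ arr[n]? = some v := by
  induction arr generalizing st with
  | nil => simp [PySem.List.enumerate_nil]
  | cons x xs ih =>
    rw [PySem.List.enumerate_cons]
    constructor
    · intro h
      rcases List.mem_cons.mp h with h1 | h2
      · refine ⟨0, by simp, ?_, ?_⟩
        · simpa using congrArg Prod.fst h1
        · simpa using (congrArg Prod.snd h1).symm
      · obtain ⟨n, hn, hi, hv⟩ := (ih (st + 1)).mp h2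
        refine ⟨n + 1, ?_, ?_, ?_⟩
        · simpa using Nat.succ_lt_succ hn
        · push_cast at hi ⊢; omega
        · simpa using hv
    · rintro ⟨n, hn, hi, hv⟩
      cases n with
      | zero =>
        apply List.mem_cons.mpr; left
        simp only [List.getElem?_cons_zero, Option.some.injEq] at hv
        simp only [Nat.cast_zero, add_zero] at hi
        simp [hi, hv]
      | succ m =>
        apply List.mem_cons.mpr; right
        have hm : m < xs.length := by simp at hn; omega
        refine (ih (st + 1)).mpr ⟨m, hm, ?_, ?_⟩
        · push_cast at hi ⊢; omega
        · simpa using hv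

-- the per-query value A computes, on a valid query, equals B's findAns over the value-sorted pairs
lemma query_eq (arr : List Int) (s e k : Int)
    (hq : s ≤ e → 0 ≤ s ∧ e < (arr.length : Int)) :
    aAns arr (s, e, k) = findAns (PySem.List.sorted (PySem.List.enumerate arr 0) (fun p => p.2)) s e k := by
  set pairs := PySem.List.sorted (PySem.List.enumerate arr 0) (fun p => p.2) with hpairs
  have hperm : pairs.Perm (PySem.List.enumerate arr 0) := PySem.List.sorted_perm _ _ _
  have hsort : pairs.Pairwise (fun a b => a.2 ≤ b.2) := PySem.List.sorted_pairwise _ _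
  by_cases hse : s ≤ e
  · obtain ⟨hs0, helt⟩ := hq hse
    -- unfold A's tmp into a filter/map over the range
    have htmp : (PySem.List.pyRange s (e + 1) 1).foldl
        (fun tmp i =>
          match PySem.List.pyGet? arr i with
          | some v => if v > k then tmp ++ [v] else tmp
          | none => tmp) []
        = ((PySem.List.pyRange s (e + 1) 1).filter
            (fun i => decide (arr.getD i.toNat 0 > k))).map (fun i => arr.getD i.toNat 0) := by
      rw [PySem.List.foldl_congr_mem _ _
        (fun tmp i => if decide (arr.getD i.toNat 0 > k) then tmp ++ [arr.getD i.toNat 0] else tmp) _ ?_]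
      · exact PySem.List.foldl_append_if _ _ _ []
      · intro acc i hi
        have hib : s ≤ i ∧ i < e + 1 := PySem.List.mem_pyRange_one.mp hi
        have h0i : 0 ≤ i := le_trans hs0 hib.1
        have hilen : i < (arr.length : Int) := by omega
        rw [PySem.List.pyGet?_eq_some_getElem arr h0i hilen]
        have hval : arr[i.toNat] = arr.getD i.toNat 0 := by
          rw [List.getD_eq_getElem?_getD, List.getElem?_eq_getElem (by omega), Option.getD_some]
        simp [hval]
    -- membership bridge: values of tmp are exactly values of pairs satisfying pvPred
    have hmem : ∀ v : Int,
        (v ∈ ((PySem.List.pyRange s (e + 1) 1).filter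
            (fun i => decide (arr.getD i.toNat 0 > k))).map (fun i => arr.getD i.toNat 0))
        ↔ ∃ p ∈ pairs, pvPred s e k p ∧ p.2 = v := by
      intro v
      constructor
      · intro hv
        obtain ⟨i, hi, hvv⟩ := List.mem_map.mp hv
        have hif := List.mem_filter.mp hi
        have hib : s ≤ i ∧ i < e + 1 := PySem.List.mem_pyRange_one.mp hif.1
        have hgt : v > k := hvv ▸ of_decide_eq_true hif.2
        have h0i : 0 ≤ i := le_trans hs0 hib.1
        have hlt : i.toNat < arr.length := by omega
        refine ⟨(i, v), ?_, ?_, rfl⟩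
        · apply hperm.mem_iff.mpr
          refine (mem_enumerate_iff arr 0 i v).mpr ⟨i.toNat, hlt, by omega, ?_⟩
          rw [List.getElem?_eq_getElem hlt]
          have : arr[i.toNat] = v := by
            rw [← hvv, List.getD_eq_getElem?_getD, List.getElem?_eq_getElem hlt, Option.getD_some]
          rw [this]
        · exact ⟨hgt, hib.1, by omega⟩
      · rintro ⟨⟨i, w⟩, hp, hpred, hv⟩
        have hv' : w = v := hv
        simp only [pvPred] at hpred
        obtain ⟨hgt, hsi, hie⟩ := hpred
        obtain ⟨n, hn, hi, hw⟩ := (mem_enumerate_iff arr 0 i w).mp (hperm.mem_iff.mp hp)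
        have hiN : i.toNat = n := by omega
        have hval : arr.getD i.toNat 0 = w := by
          rw [List.getD_eq_getElem?_getD, hiN, hw, Option.getD_some]
        apply List.mem_map.mpr
        refine ⟨i, List.mem_filter.mpr ⟨PySem.List.mem_pyRange_one.mpr ⟨hsi, by omega⟩, ?_⟩, ?_⟩
        · exact decide_eq_true (by rw [hval]; exact hgt)
        · simp only [hval, hv']
    set tmp := ((PySem.List.pyRange s (e + 1) 1).filter
        (fun i => decide (arr.getD i.toNat 0 > k))).map (fun i => arr.getD i.toNat 0) with htmpdef
    by_cases hnil : tmp = []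
    · have hnone : ∀ p ∈ pairs, ¬ pvPred s e k p := by
        intro p hp hpred
        have : p.2 ∈ tmp := (hmem p.2).mpr ⟨p, hp, hpred, rfl⟩
        simp [hnil] at this
      simp only [aAns, htmp, hnil]
      simp [findAns_of_none pairs s e k hnone]
    · -- A returns min tmp; B returns the first matching value of the sorted pairs
      obtain ⟨m, hm⟩ : ∃ m, PySem.List.min? tmp (fun x => x) = some m := by
        cases hmm : PySem.List.min? tmp (fun x => x) with
        | none => exact absurd ((PySem.List.min?_eq_none_iff tmp _).mp hmm) hnil
        | some m => exact ⟨m, rfl⟩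
      have hmmem : m ∈ tmp := PySem.List.min?_mem hm
      have hmmin : ∀ y ∈ tmp, m ≤ y := PySem.List.min?_isMin hm
      obtain ⟨p0, hp0, hp0pred, hp0v⟩ := (hmem m).mp hmmem
      have hfs := findAns_spec pairs s e k hsort p0 hp0 hp0pred
      obtain ⟨p, hp, hppred, hpv⟩ := hfs.1
      have h1 : m ≤ findAns pairs s e k := by
        rw [hpv]; exact hmmin p.2 ((hmem p.2).mpr ⟨p, hp, hppred, rfl⟩)
      have h2 : findAns pairs s e k ≤ m := by
        rw [← hp0v]; exact hfs.2 p0 hp0 hp0pred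
      have hfm : findAns pairs s e k = m := le_antisymm h2 h1
      simp only [aAns, htmp]
      rw [if_neg hnil, hm, hfm]
  · -- empty range: A's loop body never runs, and no index can satisfy s ≤ i ≤ e
    have hrange : PySem.List.pyRange s (e + 1) 1 = [] :=
      PySem.List.pyRange_one_eq_nil (by omega)
    have hnone : ∀ p ∈ pairs, ¬ pvPred s e k p := by
      rintro p _ hpred
      simp only [pvPred] at hpred
      omega
    simp only [aAns, hrange]
    simp [findAns_of_none pairs s e k hnone]

-- ===== VERDICT (by name: the statement is the Claim_ definition above) =====
theorem solution_spec : Claim_equal_solution := by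
  intro arr queries _ hpre
  unfold Spec_solution solution solution_alt
  rw [PySem.List.foldl_append_singleton_eq_map, PySem.List.foldl_append_singleton_eq_map]
  simp only [List.nil_append]
  apply List.map_congr_left
  intro q hq
  obtain ⟨s, e, k⟩ := q
  exact query_eq arr s e k (hpre (s, e, k) hq)
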